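-- pv_equiv track=rewrite | github.com/webdastur/binarysearchcom | easy/list_min_replacement.py | solve
-- ===== SOURCE A (Python) =====
-- def solve(nums):
--     min_item = nums[0]
--
--     nums[0] = 0
--
--     if len(nums) == 1:
--         return nums
--
--     for i in range(1, len(nums)):
--         current = nums[i]
--         nums[i] = min_item
--         min_item = min(current, min_item)
--     return nums
-- ===== SOURCE B (Python) =====
-- def solve(nums):
--     # Declarative: each slot j >= 1 is recomputed from scratch as min(nums[:j]),
--     # slot 0 is 0; no running accumulator is carried between slots.
--     nums[:] = [min(nums[:j]) if j else 0 for j in range(len(nums))]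
--     return nums
-- ===== Notes on version B (the rewrite author's own statement) =====
-- stated objective: simpler
-- what changed: B recomputes each output slot independently as min(nums[:j]) over the strict prefix (slot 0 is 0) in one comprehension, instead of A's stateful loop carrying a running minimum and swapping it into each cell.
import Mathlib
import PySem

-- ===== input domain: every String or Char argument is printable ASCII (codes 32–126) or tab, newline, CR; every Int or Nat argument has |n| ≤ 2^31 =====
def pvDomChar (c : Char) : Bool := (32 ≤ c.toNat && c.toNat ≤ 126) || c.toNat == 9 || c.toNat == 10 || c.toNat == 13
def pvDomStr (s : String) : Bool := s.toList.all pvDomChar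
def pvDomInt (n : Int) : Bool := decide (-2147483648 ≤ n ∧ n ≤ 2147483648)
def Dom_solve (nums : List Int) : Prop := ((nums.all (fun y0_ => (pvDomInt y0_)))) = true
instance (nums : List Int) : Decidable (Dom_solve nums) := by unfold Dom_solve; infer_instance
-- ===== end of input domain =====

-- B recomputes each output slot independently as min of its strict prefix (slot 0 is 0)
-- in one comprehension, instead of A's stateful swap loop carrying a running minimum;
-- equivalence is about the return value (both Pythons also mutate nums in place).


-- ===== PORT A =====
-- loop 'for i in range(1, len(nums)): current = nums[i]; nums[i] = min_item;
-- min_item = min(current, min_item)' as structural recursion over the tail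
def solveLoop : List Int → Int → List Int
  | [], _ => []
  | x :: xs, m => m :: solveLoop xs (min x m)

def solve (nums : List Int) : List Int :=
  match nums with
  | [] => []  -- Python raises IndexError reading nums[0]; excluded by Pre_solve
  | x :: xs =>
    let min_item := x
    -- assignment of the first slot to zero
    if xs.length = 0 then 0 :: xs
    else 0 :: solveLoop xs min_item

-- ===== PORT B =====
-- '[min(nums[:j]) if j else 0 for j in range(len(nums))]'
def solve_alt (nums : List Int) : List Int :=
  (PySem.List.pyRange 0 (nums.length : Int) 1).map fun j =>
    if j ≠ 0 then
      match PySem.List.min? (PySem.List.slice nums none (some j)) (fun y => y) with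
      | some m => m
      | none => 0  -- unreachable: nums[:j] is nonempty for 1 ≤ j < len(nums)
    else 0

-- ===== PRECONDITION & SPEC =====
-- Pre_ excludes only the empty list, on which A raises IndexError reading nums[0].
def Pre_solve (nums : List Int) : Prop := nums ≠ []
instance (nums : List Int) : Decidable (Pre_solve nums) := by unfold Pre_solve; infer_instance
def pvWitness_solve : List Int := [3, 1, 2]

def Spec_solve (nums : List Int) (out : List Int) : Prop := out = solve_alt nums
instance (nums : List Int) (out : List Int) : Decidable (Spec_solve nums out) := by unfold Spec_solve; infer_instance

-- ===== CLAIM (what is proved, stated in full; the proofs are below) =====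
def Claim_equal_solve : Prop := ∀ (nums : List Int), Dom_solve nums → Pre_solve nums → Spec_solve nums (solve nums)

-- ===== LEMMAS AND PROOFS =====
-- A's loop, elementwise: slot j of the produced tail is the fold of min over the
-- first j tail elements starting from the carried minimum m.
theorem solveLoop_eq_map (xs : List Int) : ∀ m : Int,
    solveLoop xs m = (List.range xs.length).map (fun j => (xs.take j).foldl min m) := by
  induction xs with
  | nil => intro m; simp [solveLoop]
  | cons y ys ih =>
    intro m
    simp [solveLoop, ih, List.range_succ_eq_map, Function.comp, min_comm y m]

-- B's j-th entry (1 ≤ j), unfolded: min of the prefix x :: xs.take (j-1).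
theorem solve_alt_cons (x : Int) (xs : List Int) :
    solve_alt (x :: xs) =
      (List.range (xs.length + 1)).map
        (fun k => if k = 0 then 0 else (xs.take (k - 1)).foldl min x) := by
  unfold solve_alt
  rw [show ((x :: xs).length : Int) = ((xs.length + 1 : ℕ) : Int) by simp,
      PySem.List.pyRange_one]
  simp only [sub_zero, Int.toNat_natCast, List.map_map]
  refine List.map_congr_left ?_
  intro k hk
  simp only [Function.comp, zero_add]
  by_cases hk0 : k = 0
  · simp [hk0]
  · obtain ⟨j, rfl⟩ := Nat.exists_eq_succ_of_ne_zero hk0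
    rw [if_pos (by exact_mod_cast hk0), if_neg hk0]
    rw [show ((j + 1 : ℕ) : Int) = ((j + 1 : ℕ) : Int) from rfl,
        PySem.List.slice_to_natCast]
    simp [List.take_succ_cons, PySem.List.min?_id_cons]

-- ===== VERDICT (by name: the statement is the Claim_ definition above) =====
theorem solve_spec : Claim_equal_solve := by
  intro nums _ hpre
  unfold Spec_solve
  match nums with
  | [] => exact absurd rfl hpre
  | x :: xs =>
    rw [solve_alt_cons]
    show (if xs.length = 0 then 0 :: xs else 0 :: solveLoop xs x) = _
    rw [List.range_succ_eq_map]
    rcases xs with _ | ⟨y, ys⟩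
    · simp
    · simp [solveLoop_eq_map, Function.comp]
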